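-- pv_equiv track=rewrite | github.com/johnnyou1873/c147a-project | src/data/kaggle_sequence_metadata.py | canonicalize_rna_sequence
-- ===== SOURCE A (Python) =====
-- _VALID_BASES = {"A", "C", "G", "U", "T", "N"}
--
-- def canonicalize_rna_sequence(sequence: str) -> str:
--     cleaned = str(sequence).strip().replace(" ", "").upper()
--     out: list[str] = []
--     for ch in cleaned:
--         if ch == "T":
--             out.append("U")
--         elif ch in _VALID_BASES:
--             out.append(ch)
--         else:
--             out.append("N")
--     return "".join(out)
-- ===== SOURCE B (Python) =====
-- def canonicalize_rna_sequence(sequence: str) -> str: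
--     s = str(sequence).strip().replace(" ", "").upper().replace("T", "U")
--     parts = []
--     i, n = 0, len(s)
--     while i < n:
--         j = i
--         if s[i] in "ACGUN":
--             while j < n and s[j] in "ACGUN":
--                 j += 1
--             parts.append(s[i:j])
--         else:
--             while j < n and s[j] not in "ACGUN":
--                 j += 1
--             parts.append("N" * (j - i))
--         i = j
--     return "".join(parts)
-- ===== Notes on version B (the rewrite author's own statement) =====
-- stated objective: alternative
-- what changed: Replaced A's per-character if/elif/else accumulator loop with a staged pipeline: one whole-string replace of T by U, then a run-segmentation scan that copies each maximal canonical run as a slice and emits a replicated placeholder run for each maximal non-canonical run.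
import Mathlib
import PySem

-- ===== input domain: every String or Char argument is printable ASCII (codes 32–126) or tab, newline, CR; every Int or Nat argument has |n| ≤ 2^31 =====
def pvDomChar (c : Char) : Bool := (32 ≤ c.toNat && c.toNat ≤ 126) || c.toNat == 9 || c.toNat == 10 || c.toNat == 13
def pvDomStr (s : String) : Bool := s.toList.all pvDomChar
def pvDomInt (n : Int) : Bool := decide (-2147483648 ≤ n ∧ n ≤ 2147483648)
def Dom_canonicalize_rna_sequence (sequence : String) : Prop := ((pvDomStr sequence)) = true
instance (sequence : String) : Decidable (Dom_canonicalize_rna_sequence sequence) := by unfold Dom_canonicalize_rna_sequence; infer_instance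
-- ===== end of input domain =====

-- B replaces A's per-character if/elif/else accumulator loop with a staged pipeline:
-- a whole-string replace of T by U, then a run-segmentation scan (alternative, same cost).

-- ===== PORT A =====
-- _VALID_BASES = {"A", "C", "G", "U", "T", "N"}
def pvValidBases : PySem.Set Char := PySem.Set.ofList ['A', 'C', 'G', 'U', 'T', 'N']

def canonicalize_rna_sequence (sequence : String) : String :=
  let cleaned := PySem.Chars.upper (PySem.Chars.replace (PySem.Chars.strip sequence.toList) [' '] [])
  let out : List Char := cleaned.foldl (fun out ch =>
    if ch = 'T' then out ++ ['U']
    else if PySem.Set.contains pvValidBases ch then out ++ [ch]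
    else out ++ ['N']) []
  String.ofList out

-- ===== PORT B =====
-- s[i] in "ACGUN"
def pvIsCanon (c : Char) : Bool := "ACGUN".toList.contains c

-- the outer while loop of Source B: each iteration consumes one maximal run starting at i;
-- the inner 'while j < n and …' computes the run's end, so the run is a takeWhile and
-- the remainder (rest of the scan, from j) is the matching dropWhile.
def pvRuns : List Char → List (List Char)
  | [] => []
  | c :: t =>
    if h : pvIsCanon c then
      -- canonical run: appended as the slice s[i:j]
      ((c :: t).takeWhile pvIsCanon) :: pvRuns ((c :: t).dropWhile pvIsCanon)
    else
      -- non-canonical run: appended as a replicated placeholder run of the same length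
      (List.replicate ((c :: t).takeWhile (fun x => !pvIsCanon x)).length 'N')
        :: pvRuns ((c :: t).dropWhile (fun x => !pvIsCanon x))
termination_by l => l.length
decreasing_by
  · simp only [List.dropWhile_cons, h, if_true]
    exact Nat.lt_succ_of_le (List.length_dropWhile_le _ _)
  · simp only [List.dropWhile_cons, h, Bool.not_false, if_true]
    exact Nat.lt_succ_of_le (List.length_dropWhile_le _ _)

def canonicalize_rna_sequence_alt (sequence : String) : String :=
  let s := PySem.Chars.replace
    (PySem.Chars.upper (PySem.Chars.replace (PySem.Chars.strip sequence.toList) [' '] [])) ['T'] ['U']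
  String.ofList (pvRuns s).flatten

-- ===== PRECONDITION & SPEC =====
def Spec_canonicalize_rna_sequence (sequence : String) (out : String) : Prop := out = canonicalize_rna_sequence_alt sequence
instance (sequence : String) (out : String) : Decidable (Spec_canonicalize_rna_sequence sequence out) := by unfold Spec_canonicalize_rna_sequence; infer_instance

-- ===== CLAIM (what is proved, stated in full; the proofs are below) =====
def Claim_equal_canonicalize_rna_sequence : Prop := ∀ (sequence : String), Dom_canonicalize_rna_sequence sequence → Spec_canonicalize_rna_sequence sequence (canonicalize_rna_sequence sequence)

-- ===== LEMMAS AND PROOFS =====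

-- A's per-character result
def pvAF (ch : Char) : Char :=
  if ch = 'T' then 'U' else if PySem.Set.contains pvValidBases ch then ch else 'N'

-- the T→U pass, pointwise
def pvG (c : Char) : Char := if c = 'T' then 'U' else c

-- the masking of non-canonical characters, pointwise
def pvH (c : Char) : Char := if pvIsCanon c then c else 'N'

lemma replace_go_single (l : List Char) : ∀ (fuel : Nat) (acc : List Char),
    l.length ≤ fuel →
    PySem.Chars.replace.go ['T'] ['U'] fuel l acc = acc.reverse ++ l.map pvG := by
  induction l with
  | nil =>
    intro fuel acc _
    cases fuel <;> simp [PySem.Chars.replace.go]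
  | cons c t ih =>
    intro fuel acc hlen
    match fuel with
    | 0 => simp at hlen
    | m + 1 =>
      rw [PySem.Chars.replace.go]
      have hpre : (['T'].isPrefixOf (c :: t)) = (c == 'T') := by
        simp [List.isPrefixOf, Bool.and_comm, eq_comm]
      by_cases hc : c = 'T'
      · subst hc
        rw [hpre]
        simp only [beq_self_eq_true, if_true, List.reverse_cons, List.reverse_nil,
          List.nil_append]
        simp only [List.length_cons] at hlen
        rw [show List.drop (['T'] : List Char).length ('T' :: t) = t from rfl]
        rw [ih m _ (by omega)]
        simp [pvG]
      · rw [hpre]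
        simp only [beq_iff_eq, hc, if_false]
        rw [ih m _ (by simp at hlen ⊢; omega)]
        simp [pvG, hc]

lemma replace_single (l : List Char) :
    PySem.Chars.replace l ['T'] ['U'] = l.map pvG := by
  rw [PySem.Chars.replace]
  simp only [List.isEmpty_cons, if_false, Bool.false_eq_true]
  exact replace_go_single l l.length [] le_rfl

lemma takeWhile_map_self (p : Char → Bool) (f : Char → Char)
    (hf : ∀ x, p x = true → f x = x) (l : List Char) :
    (l.takeWhile p).map f = l.takeWhile p := by
  rw [List.map_congr_left (fun x hx => hf x (List.mem_takeWhile_imp hx))]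
  exact List.map_id _

lemma flatten_pvRuns (l : List Char) : (pvRuns l).flatten = l.map pvH := by
  fun_induction pvRuns l with
  | case1 => simp
  | case2 c t h ih =>
    rw [List.flatten_cons, ih]
    conv_rhs => rw [← List.takeWhile_append_dropWhile (p := pvIsCanon) (l := c :: t)]
    rw [List.map_append]
    congr 1
    rw [takeWhile_map_self pvIsCanon pvH (fun x hx => by simp [pvH, hx])]
  | case3 c t h ih =>
    rw [List.flatten_cons, ih]
    conv_rhs => rw [← List.takeWhile_append_dropWhile (p := fun x => !pvIsCanon x) (l := c :: t)]
    rw [List.map_append]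
    congr 1
    symm
    rw [List.eq_replicate_iff]
    refine ⟨by simp, ?_⟩
    intro b hb
    simp only [List.mem_map] at hb
    obtain ⟨x, hx, rfl⟩ := hb
    have := List.mem_takeWhile_imp hx
    simp only [Bool.not_eq_true'] at this
    simp [pvH, this]

lemma af_pointwise (ch : Char) : pvH (pvG ch) = pvAF ch := by
  by_cases h : ch = 'T'
  · subst h; decide
  · have hset : (PySem.Set.contains pvValidBases ch = true) ↔
        (ch = 'A' ∨ ch = 'C' ∨ ch = 'G' ∨ ch = 'U' ∨ ch = 'T' ∨ ch = 'N') := by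
      simp [pvValidBases, PySem.Set.contains, PySem.Set.ofList]
    have hcan : (pvIsCanon ch = true) ↔
        (ch = 'A' ∨ ch = 'C' ∨ ch = 'G' ∨ ch = 'U' ∨ ch = 'N') := by
      have hl : "ACGUN".toList = ['A', 'C', 'G', 'U', 'N'] := rfl
      simp [pvIsCanon, hl]
    simp only [pvG, pvAF, pvH, if_neg h]
    split_ifs with h1 h2 h2
    · rfl
    · rw [hset] at h2; rw [hcan] at h1; tauto
    · rw [hset] at h2; rw [hcan] at h1; tauto
    · rfl

-- ===== VERDICT (by name: the statement is the Claim_ definition above) =====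
theorem canonicalize_rna_sequence_spec : Claim_equal_canonicalize_rna_sequence := by
  intro s _
  unfold Spec_canonicalize_rna_sequence canonicalize_rna_sequence canonicalize_rna_sequence_alt
  simp only []
  rw [replace_single, flatten_pvRuns, List.map_map]
  rw [show (fun (out : List Char) ch =>
        if ch = 'T' then out ++ ['U']
        else if PySem.Set.contains pvValidBases ch then out ++ [ch]
        else out ++ ['N']) = (fun (out : List Char) ch => out ++ [pvAF ch]) from by
      funext out ch
      simp only [pvAF]
      split_ifs <;> rfl]
  rw [PySem.List.foldl_append_singleton_eq_map, List.nil_append]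
  apply congrArg String.ofList
  exact List.map_congr_left (fun ch _ => (af_pointwise ch).symm)
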